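-- pv_equiv track=rewrite | github.com/GidonPeeper/LEACE | Syntactic_distances/pyfiles/Probing/linear_probe_pos.py | align_pos_to_embeddings
-- ===== SOURCE A (Python) =====
-- def align_pos_to_embeddings(pos_sentences, emb_lengths):
--     aligned_pos = []
--     pos_idx = 0
--     for emb_len in emb_lengths:
--         # Skip POS sentences until we find one with the right length
--         while pos_idx < len(pos_sentences) and len(pos_sentences[pos_idx]) != emb_len:
--             pos_idx += 1
--         if pos_idx == len(pos_sentences):
--             break
--         aligned_pos.append(pos_sentences[pos_idx])
--         pos_idx += 1
--     return aligned_pos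
-- ===== SOURCE B (Python) =====
-- def align_pos_to_embeddings(pos_sentences, emb_lengths):
--     # Flat single loop over pos_sentences, consuming a queue of emb lengths.
--     result = []
--     remaining = list(emb_lengths)
--     for sentence in pos_sentences:
--         if not remaining:
--             break
--         if len(sentence) == remaining[0]:
--             result.append(sentence)
--             remaining.pop(0)
--     return result
-- ===== Notes on version B (the rewrite author's own statement) =====
-- stated objective: simpler
-- what changed: Replaces A's nested for-over-emb_lengths with inner index-skipping while loop by a single flat loop over pos_sentences that consumes a queue of embedding lengths, appending a sentence exactly when it matches the head length.
import Mathlib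
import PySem

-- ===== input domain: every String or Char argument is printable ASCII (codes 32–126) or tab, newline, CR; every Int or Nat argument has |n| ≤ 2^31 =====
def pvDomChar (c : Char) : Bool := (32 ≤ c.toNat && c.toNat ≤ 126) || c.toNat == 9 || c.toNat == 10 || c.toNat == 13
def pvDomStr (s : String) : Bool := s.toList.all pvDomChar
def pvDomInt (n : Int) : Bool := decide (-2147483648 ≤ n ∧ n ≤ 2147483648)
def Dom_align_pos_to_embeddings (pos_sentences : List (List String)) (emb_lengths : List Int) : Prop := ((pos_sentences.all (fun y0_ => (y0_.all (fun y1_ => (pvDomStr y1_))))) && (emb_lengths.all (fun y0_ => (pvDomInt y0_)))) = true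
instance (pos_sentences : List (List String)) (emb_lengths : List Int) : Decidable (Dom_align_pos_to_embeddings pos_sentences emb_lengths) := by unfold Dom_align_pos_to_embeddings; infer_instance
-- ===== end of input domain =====

-- B replaces A's nested for/while with a single flat loop over pos_sentences consuming a queue of lengths (simpler decomposition, same cost).


-- ===== PORT A =====
-- A's inner `while pos_idx < len(pos_sentences) and len(pos_sentences[pos_idx]) != emb_len: pos_idx += 1`
def pvSkipIdx (ps : List (List String)) (embLen : Int) (i : Nat) : Nat :=
  if h : i < ps.length ∧ ((ps.getD i []).length : Int) ≠ embLen then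
    pvSkipIdx ps embLen (i + 1)
  else i
termination_by ps.length - i
decreasing_by omega

-- A's `for emb_len in emb_lengths` with state (pos_idx, aligned_pos)
def pvAlignALoop (ps : List (List String)) : List Int → Nat → List (List String) → List (List String)
  | [], _, acc => acc
  | e :: es, posIdx, acc =>
      let j := pvSkipIdx ps e posIdx
      if j = ps.length then acc
      else pvAlignALoop ps es (j + 1) (acc ++ [ps.getD j []])

def align_pos_to_embeddings (pos_sentences : List (List String)) (emb_lengths : List Int) : List (List String) :=
  pvAlignALoop pos_sentences emb_lengths 0 []

-- ===== PORT B =====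
-- B's flat `for sentence in pos_sentences` loop over the remaining queue of lengths
def pvAlignAltLoop : List (List String) → List Int → List (List String)
  | [], _ => []
  | _ :: _, [] => []
  | s :: rest, e :: es =>
      if (s.length : Int) = e then s :: pvAlignAltLoop rest es
      else pvAlignAltLoop rest (e :: es)

def align_pos_to_embeddings_alt (pos_sentences : List (List String)) (emb_lengths : List Int) : List (List String) :=
  pvAlignAltLoop pos_sentences emb_lengths

-- ===== PRECONDITION & SPEC =====
def Spec_align_pos_to_embeddings (pos_sentences : List (List String)) (emb_lengths : List Int) (out : List (List String)) : Prop := out = align_pos_to_embeddings_alt pos_sentences emb_lengths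
instance (pos_sentences : List (List String)) (emb_lengths : List Int) (out : List (List String)) : Decidable (Spec_align_pos_to_embeddings pos_sentences emb_lengths out) := by unfold Spec_align_pos_to_embeddings; infer_instance

-- ===== CLAIM (what is proved, stated in full; the proofs are below) =====
def Claim_equal_align_pos_to_embeddings : Prop := ∀ (pos_sentences : List (List String)) (emb_lengths : List Int), Dom_align_pos_to_embeddings pos_sentences emb_lengths → Spec_align_pos_to_embeddings pos_sentences emb_lengths (align_pos_to_embeddings pos_sentences emb_lengths)

-- ===== LEMMAS AND PROOFS =====
theorem pvAlignAltLoop_nil_right (xs : List (List String)) : pvAlignAltLoop xs [] = [] := by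
  cases xs <;> simp [pvAlignAltLoop]

theorem pvSkipIdx_stop (ps : List (List String)) (e : Int) (i : Nat)
    (h : ¬ (i < ps.length ∧ ((ps.getD i []).length : Int) ≠ e)) : pvSkipIdx ps e i = i := by
  rw [pvSkipIdx, dif_neg h]

theorem pvSkipIdx_step (ps : List (List String)) (e : Int) (i : Nat)
    (h : i < ps.length ∧ ((ps.getD i []).length : Int) ≠ e) :
    pvSkipIdx ps e i = pvSkipIdx ps e (i + 1) := by
  rw [pvSkipIdx, dif_pos h]

theorem pvAlign_main (ps : List (List String)) :
    ∀ (n : Nat) (es : List Int) (i : Nat) (acc : List (List String)),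
      es.length + (ps.length - i) ≤ n → i ≤ ps.length →
      pvAlignALoop ps es i acc = acc ++ pvAlignAltLoop (ps.drop i) es := by
  intro n
  induction n with
  | zero =>
      intro es i acc hn hi
      have hes : es = [] := by cases es <;> simp_all
      subst hes
      simp [pvAlignALoop, pvAlignAltLoop_nil_right]
  | succ n ih =>
      intro es i acc hn hi
      cases es with
      | nil => simp [pvAlignALoop, pvAlignAltLoop_nil_right]
      | cons e es =>
        simp only [List.length_cons] at hn
        by_cases hlt : i < ps.length
        · have hdrop := List.drop_eq_getElem_cons hlt
          have hgetD : ps.getD i [] = ps[i] := List.getD_eq_getElem ps [] hlt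
          by_cases hm : ((ps.getD i []).length : Int) = e
          · -- match: consume sentence and length together
            have hskip : pvSkipIdx ps e i = i := pvSkipIdx_stop ps e i (fun hc => hc.2 hm)
            have hne : i ≠ ps.length := by omega
            have hstep : pvAlignALoop ps (e :: es) i acc
                = pvAlignALoop ps es (i + 1) (acc ++ [ps.getD i []]) := by
              simp only [pvAlignALoop, hskip]
              rw [if_neg hne]
            rw [hstep, ih es (i + 1) (acc ++ [ps.getD i []]) (by omega) (by omega),
              hdrop, pvAlignAltLoop]
            rw [hgetD] at hm
            simp [hm]
            simpa using hgetD
          · -- mismatch: skip this sentence on both sides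
            have hskip : pvSkipIdx ps e i = pvSkipIdx ps e (i + 1) := pvSkipIdx_step ps e i ⟨hlt, hm⟩
            have hA : pvAlignALoop ps (e :: es) i acc = pvAlignALoop ps (e :: es) (i + 1) acc := by
              simp only [pvAlignALoop, hskip]
            rw [hA, ih (e :: es) (i + 1) acc (by simp only [List.length_cons]; omega) (by omega),
              hdrop, pvAlignAltLoop]
            rw [hgetD] at hm
            simp [hm]
        · have hieq : i = ps.length := by omega
          have hskip : pvSkipIdx ps e i = i := pvSkipIdx_stop ps e i (fun hc => absurd hc.1 hlt)
          have hA : pvAlignALoop ps (e :: es) i acc = acc := by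
            simp only [pvAlignALoop, hskip]
            rw [if_pos hieq]
          rw [hA, hieq, List.drop_length]
          simp [pvAlignAltLoop]

-- ===== VERDICT (by name: the statement is the Claim_ definition above) =====
theorem align_pos_to_embeddings_spec : Claim_equal_align_pos_to_embeddings := by
  intro ps es _
  unfold Spec_align_pos_to_embeddings align_pos_to_embeddings align_pos_to_embeddings_alt
  have := pvAlign_main ps (es.length + ps.length) es 0 [] (by omega) (by omega)
  simpa using this
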